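-- pv_equiv track=rewrite | github.com/pypi-data/pypi-mirror-332 | packages/dolomite-matrix/dolomite_matrix-0.4.1.tar.gz/dolomite_matrix-0.4.1/src/dolomite_matrix/choose_chunk_dimensions.py | choose_chunk_dimensions
-- ===== SOURCE A (Python) =====
-- from typing import Tuple
--
-- def choose_chunk_dimensions(shape: Tuple[int, ...], size: int, min_extent: int = 100, buffer_size: int = 1e7) -> Tuple[int, ...]:
--     """
--     Choose chunk dimensions to use for a dense HDF5 dataset. For each
--     dimension, we consider a slice of the array that consists of the full
--     extent of all other dimensions. We want this slice to occupy less than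
--     ``buffer_size`` in memory, and we resize the slice along the current
--     dimension to achieve this. The chunk size is then chosen as the size of the
--     slice along the current dimension. This ensures that efficient iteration
--     along each dimension will not use any more than ``buffer_size`` bytes.
--
--     Args:
--         shape: Shape of the array.
--
--         size: Size of each array element in bytes.
--
--         min_extent:
--             Minimum extent of each chunk dimension, to avoid problems
--             with excessively small chunk sizes when the data is large.
--
--         buffer_size:
--             Size of the (conceptual) memory buffer to use for storing blocks of
--             data during iteration through the array, in bytes.
--
--     Returns:
--         Tuple containing the chunk dimensions.
--     """
--
--     num_elements = int(buffer_size / size)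
--     chunks = []
--
--     for d, s in enumerate(shape):
--         otherdim = 1
--         for d2, s2 in enumerate(shape): # just calculating it again to avoid overflow issues.
--             if d2 != d:
--                 otherdim *= s2
--
--         proposed = int(num_elements / otherdim)
--         if proposed > s:
--             proposed = s
--         elif proposed < min_extent and min_extent <= s:
--             proposed = min_extent
--
--         chunks.append(proposed)
--
--     return (*chunks,)
-- ===== SOURCE B (Python) =====
-- def choose_chunk_dimensions(shape, size, min_extent=100, buffer_size=1e7):
--     num_elements = int(buffer_size / size)
--
--     # prefix[i] = product of shape[:i]; suffix[i] = product of shape[i+1:]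
--     prefix = []
--     acc = 1
--     for s in shape:
--         prefix.append(acc)
--         acc *= s
--     suffix = []
--     acc = 1
--     for s in reversed(shape):
--         suffix.append(acc)
--         acc *= s
--     suffix.reverse()
--
--     chunks = []
--     for s, p, q in zip(shape, prefix, suffix):
--         otherdim = p * q
--         proposed = int(num_elements / otherdim)
--         if proposed > s:
--             proposed = s
--         elif proposed < min_extent and min_extent <= s:
--             proposed = min_extent
--         chunks.append(proposed)
--     return (*chunks,)
-- ===== Notes on version B (the rewrite author's own statement) =====
-- stated objective: faster
-- what changed: Replaces the nested loop that recomputes the product of all other dimensions for each index with one forward prefix-product pass and one backward suffix-product pass, then a single zip loop using otherdim = prefix[i]*suffix[i].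
import Mathlib
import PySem

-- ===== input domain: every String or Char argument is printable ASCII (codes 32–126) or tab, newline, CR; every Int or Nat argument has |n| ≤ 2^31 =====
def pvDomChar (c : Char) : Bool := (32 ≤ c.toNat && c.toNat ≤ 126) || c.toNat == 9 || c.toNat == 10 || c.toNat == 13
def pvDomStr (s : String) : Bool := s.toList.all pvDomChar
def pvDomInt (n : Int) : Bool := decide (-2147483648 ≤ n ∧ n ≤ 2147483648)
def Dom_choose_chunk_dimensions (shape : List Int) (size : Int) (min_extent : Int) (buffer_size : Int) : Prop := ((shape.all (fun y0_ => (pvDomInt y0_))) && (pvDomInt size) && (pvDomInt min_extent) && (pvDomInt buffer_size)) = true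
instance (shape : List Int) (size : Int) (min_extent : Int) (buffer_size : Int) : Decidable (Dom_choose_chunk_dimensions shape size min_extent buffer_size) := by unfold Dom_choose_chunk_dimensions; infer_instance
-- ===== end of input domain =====

-- B replaces A's O(n^2) nested product loop by one prefix-product pass and one
-- suffix-product pass (otherdim = prefix[i]*suffix[i]), keeping the identical
-- division and clamping; equal return values on all inputs satisfying Pre_.

-- ===== PORT A =====
-- int(x / y) on ints: for the Dom magnitudes Python's float division truncates
-- to exactly the mathematical truncated quotient, i.e. PySem.Int.truncdiv
-- (|buffer_size|,|size| ≤ 2^31 < 2^53; and |num_elements| ≤ 2^31 keeps the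
-- inner quotient far enough from every nonzero integer boundary).
-- Division by zero raises in Python; those inputs are excluded by Pre_ below.
def choose_chunk_dimensions (shape : List Int) (size : Int) (min_extent : Int) (buffer_size : Int) : List Int :=
  let num_elements := PySem.Int.truncdiv buffer_size size
  (PySem.List.enumerate shape).foldl (fun chunks ds =>
    let otherdim := (PySem.List.enumerate shape).foldl (fun o p =>
        if p.1 ≠ ds.1 then o * p.2 else o) 1
    let proposed := PySem.Int.truncdiv num_elements otherdim
    let proposed := if proposed > ds.2 then ds.2
      else if proposed < min_extent ∧ min_extent ≤ ds.2 then min_extent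
      else proposed
    chunks ++ [proposed]) []

-- ===== PORT B =====
def choose_chunk_dimensions_alt (shape : List Int) (size : Int) (min_extent : Int) (buffer_size : Int) : List Int :=
  let num_elements := PySem.Int.truncdiv buffer_size size
  let pref := (shape.foldl (fun (st : List Int × Int) s => (st.1 ++ [st.2], st.2 * s)) ([], 1)).1
  let suff := ((shape.reverse.foldl (fun (st : List Int × Int) s => (st.1 ++ [st.2], st.2 * s)) ([], 1)).1).reverse
  (List.zip shape (List.zip pref suff)).foldl (fun chunks t =>
    let otherdim := t.2.1 * t.2.2
    let proposed := PySem.Int.truncdiv num_elements otherdim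
    let proposed := if proposed > t.1 then t.1
      else if proposed < min_extent ∧ min_extent ≤ t.1 then min_extent
      else proposed
    chunks ++ [proposed]) []

-- ===== PRECONDITION & SPEC =====
-- Pre_ excludes exactly the inputs where Python A raises ZeroDivisionError:
-- size = 0, or a zero dimension in a shape of length ≥ 2 (the product of the
-- other dimensions is then 0 for some index). B raises there as well.
def Pre_choose_chunk_dimensions (shape : List Int) (size : Int) (min_extent : Int) (buffer_size : Int) : Prop :=
  size ≠ 0 ∧ ((0 : Int) ∈ shape → shape.length ≤ 1)
instance (shape : List Int) (size : Int) (min_extent : Int) (buffer_size : Int) : Decidable (Pre_choose_chunk_dimensions shape size min_extent buffer_size) := by unfold Pre_choose_chunk_dimensions; infer_instance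
def pvWitness_choose_chunk_dimensions : List Int × Int × Int × Int := ([100, 200], 8, 100, 10000000)

def Spec_choose_chunk_dimensions (shape : List Int) (size : Int) (min_extent : Int) (buffer_size : Int) (out : List Int) : Prop := out = choose_chunk_dimensions_alt shape size min_extent buffer_size
instance (shape : List Int) (size : Int) (min_extent : Int) (buffer_size : Int) (out : List Int) : Decidable (Spec_choose_chunk_dimensions shape size min_extent buffer_size out) := by unfold Spec_choose_chunk_dimensions; infer_instance

-- ===== CLAIM (what is proved, stated in full; the proofs are below) =====
def Claim_equal_choose_chunk_dimensions : Prop := ∀ (shape : List Int) (size : Int) (min_extent : Int) (buffer_size : Int), Dom_choose_chunk_dimensions shape size min_extent buffer_size → Pre_choose_chunk_dimensions shape size min_extent buffer_size → Spec_choose_chunk_dimensions shape size min_extent buffer_size (choose_chunk_dimensions shape size min_extent buffer_size)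

-- ===== LEMMAS AND PROOFS =====

-- the clamped chunk size for one dimension
def pvBody (ne me s od : Int) : Int :=
  let p := PySem.Int.truncdiv ne od
  if p > s then s else if p < me ∧ me ≤ s then me else p

-- product of all entries except the one at index k
def pvOther (xs : List Int) (k : Nat) : Int := (xs.take k).prod * (xs.drop (k + 1)).prod

-- the common value of both ports
def pvModel (xs : List Int) (ne me : Int) : List Int :=
  (List.range xs.length).map (fun k => pvBody ne me (xs.getD k 0) (pvOther xs k))

lemma pv_fold_all_ne (xs : List Int) (d : Int) :
    ∀ (s a : Int), d < s →
      (PySem.List.enumerate xs s).foldl (fun o p => if p.1 ≠ d then o * p.2 else o) a = a * xs.prod := by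
  induction xs with
  | nil => intro s a _; simp [PySem.List.enumerate_nil]
  | cons x t ih =>
      intro s a h
      rw [PySem.List.enumerate_cons]
      simp only [List.foldl_cons]
      rw [if_pos (by omega), ih (s+1) (a*x) (by omega)]
      simp [List.prod_cons, mul_assoc]

lemma pv_fold_other (xs : List Int) :
    ∀ (k : Nat) (s a : Int), k < xs.length →
      (PySem.List.enumerate xs s).foldl (fun o p => if p.1 ≠ (s + (k : Int)) then o * p.2 else o) a
        = a * pvOther xs k := by
  induction xs with
  | nil => intro k s a h; simp at h
  | cons x t ih =>
      intro k s a h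
      rw [PySem.List.enumerate_cons]
      simp only [List.foldl_cons]
      cases k with
      | zero =>
          rw [if_neg (by simp), pv_fold_all_ne t (s + ((0:Nat) : Int)) (s+1) a (by push_cast; omega)]
          simp [pvOther]
      | succ k =>
          rw [if_pos (by push_cast; omega)]
          have heq : (fun (o : Int) (p : Int × Int) => if p.1 ≠ (s + ((k+1:Nat) : Int)) then o * p.2 else o)
                  = (fun (o : Int) (p : Int × Int) => if p.1 ≠ ((s+1) + ((k:Nat) : Int)) then o * p.2 else o) := by
            funext o p; congr 2; push_cast; omega
          rw [heq, ih k (s+1) (a*x) (by simpa using Nat.lt_of_succ_lt_succ h)]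
          simp only [pvOther, List.take_succ_cons, List.drop_succ_cons, List.prod_cons]
          ring

lemma pv_map_enumerate {β : Type} (F : Int × Int → β) (xs : List Int) :
    ∀ s, (PySem.List.enumerate xs s).map F
      = (List.range xs.length).map (fun (k : Nat) => F (s + (k : Int), xs.getD k 0)) := by
  induction xs with
  | nil => intro s; simp [PySem.List.enumerate_nil]
  | cons x t ih =>
      intro s
      rw [PySem.List.enumerate_cons]
      simp only [List.map_cons, List.length_cons, List.range_succ_eq_map, ih (s+1),
        List.map_map]
      congr 1
      · simp
      apply List.map_congr_left
      intro k _
      simp only [Function.comp_apply, List.getD_cons_succ]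
      congr 2
      push_cast
      ring

lemma pv_A_eq_model (shape : List Int) (size min_extent buffer_size : Int) :
    choose_chunk_dimensions shape size min_extent buffer_size
      = pvModel shape (PySem.Int.truncdiv buffer_size size) min_extent := by
  have hA : choose_chunk_dimensions shape size min_extent buffer_size
      = (PySem.List.enumerate shape).foldl (fun chunks ds =>
          chunks ++ [pvBody (PySem.Int.truncdiv buffer_size size) min_extent ds.2
            ((PySem.List.enumerate shape).foldl (fun o p => if p.1 ≠ ds.1 then o * p.2 else o) 1)]) [] := rfl
  rw [hA, PySem.List.foldl_append_singleton_eq_map, List.nil_append, pv_map_enumerate]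
  unfold pvModel
  apply List.map_congr_left
  intro k hk
  have hk' : k < shape.length := List.mem_range.mp hk
  rw [pv_fold_other shape k 0 1 hk', one_mul]

lemma pv_prefix_fold (xs : List Int) :
    ∀ (acc : List Int) (a : Int),
      (xs.foldl (fun (st : List Int × Int) s => (st.1 ++ [st.2], st.2 * s)) (acc, a)).1
        = acc ++ (List.range xs.length).map (fun k => a * (xs.take k).prod) := by
  induction xs with
  | nil => intro acc a; simp
  | cons x t ih =>
      intro acc a
      rw [List.foldl_cons, ih, List.length_cons, List.range_succ_eq_map, List.map_cons,
          List.map_map, List.append_assoc, List.singleton_append]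
      congr 1
      congr 1
      · simp
      apply List.map_congr_left
      intro k _
      simp only [Function.comp_apply, List.take_succ_cons, List.prod_cons]
      ring

lemma pv_prefix (xs : List Int) :
    (xs.foldl (fun (st : List Int × Int) s => (st.1 ++ [st.2], st.2 * s)) ([], 1)).1
      = (List.range xs.length).map (fun k => (xs.take k).prod) := by
  rw [pv_prefix_fold xs [] 1]
  simp

lemma pv_suffix (xs : List Int) :
    ((xs.reverse.foldl (fun (st : List Int × Int) s => (st.1 ++ [st.2], st.2 * s)) ([], 1)).1).reverse
      = (List.range xs.length).map (fun k => (xs.drop (k + 1)).prod) := by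
  rw [pv_prefix xs.reverse]
  apply List.ext_getElem
  · simp
  intro i h1 h2
  simp only [List.length_reverse, List.length_map, List.length_range] at h1 h2
  simp only [List.getElem_reverse, List.getElem_map, List.getElem_range, List.length_map,
    List.length_range, List.length_reverse]
  rw [List.take_reverse, List.prod_reverse]
  congr 2
  omega

lemma pv_zip_model (shape : List Int) :
    shape.zip (((List.range shape.length).map (fun k => (shape.take k).prod)).zip
        ((List.range shape.length).map (fun k => (shape.drop (k + 1)).prod)))
      = (List.range shape.length).map
          (fun k => (shape.getD k 0, ((shape.take k).prod, (shape.drop (k + 1)).prod))) := by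
  apply List.ext_getElem
  · simp
  intro i h1 h2
  simp only [List.length_zip, List.length_map, List.length_range, min_self] at h1
  simp [List.getElem_zip, List.getD_eq_getElem?_getD, List.getElem?_eq_getElem h1]

lemma pv_B_eq_model (shape : List Int) (size min_extent buffer_size : Int) :
    choose_chunk_dimensions_alt shape size min_extent buffer_size
      = pvModel shape (PySem.Int.truncdiv buffer_size size) min_extent := by
  have hB : choose_chunk_dimensions_alt shape size min_extent buffer_size
      = (List.zip shape (List.zip
            ((shape.foldl (fun (st : List Int × Int) s => (st.1 ++ [st.2], st.2 * s)) ([], 1)).1)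
            (((shape.reverse.foldl (fun (st : List Int × Int) s => (st.1 ++ [st.2], st.2 * s)) ([], 1)).1).reverse))).foldl
          (fun chunks t =>
            chunks ++ [pvBody (PySem.Int.truncdiv buffer_size size) min_extent t.1 (t.2.1 * t.2.2)]) [] := rfl
  rw [hB, pv_prefix, pv_suffix, pv_zip_model, PySem.List.foldl_append_singleton_eq_map,
      List.nil_append, List.map_map]
  unfold pvModel
  apply List.map_congr_left
  intro k _
  simp [pvOther, Function.comp]

-- ===== VERDICT (by name: the statement is the Claim_ definition above) =====
theorem choose_chunk_dimensions_spec : Claim_equal_choose_chunk_dimensions := by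
  intro shape size min_extent buffer_size _ _
  unfold Spec_choose_chunk_dimensions
  rw [pv_A_eq_model, pv_B_eq_model]
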